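-- pv_equiv track=rewrite | github.com/minimal-systems/platform_build | core/definitions.py | fix_notice_deps
-- ===== SOURCE A (Python) =====
-- def fix_notice_deps(all_modules, all_modules_attrs):
--     """
--     Replace unadorned module names in the 'NOTICE_DEPS' attribute with their adorned versions.
--
--     Args:
--         all_modules (dict): Dictionary of all module attributes, where keys are module names and values are dictionaries of attributes.
--         all_modules_attrs (dict of dict): Attributes of each module, where the outer keys are module names,
--                                           and the inner keys include 'NOTICE_DEPS' and 'PATH' attributes.
--
--     Returns:
--         dict of dict: Updated module attributes with corrected 'NOTICE_DEPS'.
--     """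
--     # Collect all unique module references from 'NOTICE_DEPS' attributes.
--     all_module_refs = set()
--     for module_name, attrs in all_modules_attrs.items():
--         if 'NOTICE_DEPS' in attrs:
--             for dep in attrs['NOTICE_DEPS']:
--                 dep_name = dep.split(":")[
--                     0]    # Extract the module name from the dependency string
--                 all_module_refs.add(dep_name)
--
--     # Build a lookup dictionary for adorned module names.
--     lookup = {}
--     for ref in sorted(all_module_refs):
--         if ref in all_modules_attrs and "PATH" in all_modules_attrs[ref]:
--             lookup[ref] = [ref
--                           ]    # If the module is already adorned, add it as-is
--         else:
--             # Find possible adorned versions of the module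
--             adorned_versions = [
--                 f"{ref}_32", f"{ref}_64", f"host_cross_{ref}",
--                 f"host_cross_{ref}_32", f"host_cross_{ref}_64"
--             ]
--             # Check if these adorned versions exist in all_modules and add them to lookup
--             lookup[ref] = [
--                 mod for mod in adorned_versions if mod in all_modules
--             ]
--
--     # Update 'NOTICE_DEPS' for each module using the lookup dictionary
--     for module_name, attrs in all_modules_attrs.items():
--         notice_deps = attrs.get("NOTICE_DEPS", [])
--         updated_deps = set()    # Use a set to avoid duplicates
--
--         for dep in notice_deps:
--             dep_name, dep_suffix = dep.split(":", 1) if ":" in dep else (dep,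
--                                                                          "")
--             adorned_names = lookup.get(dep_name, [dep_name])
--
--             # Create new dependencies with adorned names and the original suffix, if any
--             for name in adorned_names:
--                 updated_deps.add(f"{name}:{dep_suffix}" if dep_suffix else name)
--
--         # Update the NOTICE_DEPS attribute for the module
--         all_modules_attrs[module_name]["NOTICE_DEPS"] = sorted(updated_deps)
--
--     return all_modules_attrs
-- ===== SOURCE B (Python) =====
-- def fix_notice_deps(all_modules, all_modules_attrs):
--     """Single inline pass: compute each module's adorned NOTICE_DEPS directly
--     (no global ref set, no lookup dict), then assign the results in place."""
--     def adorned(dep_name):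
--         if dep_name in all_modules_attrs and "PATH" in all_modules_attrs[dep_name]:
--             return [dep_name]
--         return [mod for mod in (f"{dep_name}_32", f"{dep_name}_64",
--                                 f"host_cross_{dep_name}", f"host_cross_{dep_name}_32",
--                                 f"host_cross_{dep_name}_64") if mod in all_modules]
--
--     new_deps = []
--     for module_name, attrs in all_modules_attrs.items():
--         updated = set()
--         for dep in attrs.get("NOTICE_DEPS", []):
--             dep_name, dep_suffix = dep.split(":", 1) if ":" in dep else (dep, "")
--             for name in adorned(dep_name):
--                 updated.add(f"{name}:{dep_suffix}" if dep_suffix else name)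
--         new_deps.append((module_name, sorted(updated)))
--     for module_name, deps in new_deps:
--         all_modules_attrs[module_name]["NOTICE_DEPS"] = deps
--     return all_modules_attrs
-- ===== Notes on version B (the rewrite author's own statement) =====
-- stated objective: simpler
-- what changed: B drops A's two global preprocessing passes (the all_module_refs set and the sorted-refs lookup dict) and computes each module's adorned NOTICE_DEPS inline in one pass over all_modules_attrs, then assigns the results in place.
import Mathlib
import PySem

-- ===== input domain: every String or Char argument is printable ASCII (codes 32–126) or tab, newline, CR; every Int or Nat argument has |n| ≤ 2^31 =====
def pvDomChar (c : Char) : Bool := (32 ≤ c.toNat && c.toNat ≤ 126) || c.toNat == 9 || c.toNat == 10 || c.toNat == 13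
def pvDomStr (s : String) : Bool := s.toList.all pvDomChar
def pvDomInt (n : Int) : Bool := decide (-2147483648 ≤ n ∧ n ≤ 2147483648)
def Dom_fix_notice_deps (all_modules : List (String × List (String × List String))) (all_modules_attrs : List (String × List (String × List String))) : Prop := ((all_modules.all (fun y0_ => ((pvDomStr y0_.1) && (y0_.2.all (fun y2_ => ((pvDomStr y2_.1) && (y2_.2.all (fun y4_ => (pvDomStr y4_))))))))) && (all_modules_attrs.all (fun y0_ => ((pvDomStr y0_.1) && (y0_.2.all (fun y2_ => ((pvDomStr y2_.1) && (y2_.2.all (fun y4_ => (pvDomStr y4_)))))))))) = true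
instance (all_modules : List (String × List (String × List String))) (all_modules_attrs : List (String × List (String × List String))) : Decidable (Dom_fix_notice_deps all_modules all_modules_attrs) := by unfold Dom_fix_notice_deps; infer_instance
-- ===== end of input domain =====

-- B drops A's global ref-set and lookup-dict passes and computes each module's adorned
-- NOTICE_DEPS inline in a single pass (simpler decomposition, same results, same in-place update).


-- shared f-string/concat helper (f"..." pieces are joined with "")
def pvCat (parts : List String) : String := PySem.Str.join "" parts

-- dep.split(":", 1) if ":" in dep else (dep, "")  — the identical expression appears in A and B
def pvNameSuffix (dep : String) : String × String :=
  if PySem.Str.isIn ":" dep then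
    let parts := (PySem.Str.splitMax? dep ":" 1).getD []
    (parts.headD "", (parts.drop 1).headD "")
  else (dep, "")

-- ===== PORT A =====

-- dep.split(":")[0]  (split with a non-empty sep always returns a non-empty list, so the
-- total forms .getD [] / .headD "" compute exactly Python's value)
def pvSplitHead (dep : String) : String := ((PySem.Str.split? dep ":").getD []).headD ""

-- pass 1: all_module_refs
def pvRefs (all_modules_attrs : List (String × List (String × List String))) : PySem.Set String :=
  all_modules_attrs.foldl (fun s p =>
    if (PySem.Dict.mk p.2).contains "NOTICE_DEPS" then
      ((PySem.Dict.mk p.2).getD "NOTICE_DEPS" []).foldl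
        (fun s dep => PySem.Set.add s (pvSplitHead dep)) s
    else s) PySem.Set.empty

-- pass 2: the lookup dict over sorted refs
def pvLookup (all_modules : List (String × List (String × List String)))
    (all_modules_attrs : List (String × List (String × List String))) : PySem.Dict String (List String) :=
  (PySem.List.sorted (pvRefs all_modules_attrs) (fun x => x) false).foldl (fun d ref =>
    if (PySem.Dict.mk all_modules_attrs).contains ref
        && (PySem.Dict.mk ((PySem.Dict.mk all_modules_attrs).getD ref [])).contains "PATH" then
      d.insert ref [ref]
    else
      d.insert ref (([pvCat [ref, "_32"], pvCat [ref, "_64"], pvCat ["host_cross_", ref],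
          pvCat ["host_cross_", ref, "_32"], pvCat ["host_cross_", ref, "_64"]]).filter
        (fun m => (PySem.Dict.mk all_modules).contains m))) PySem.Dict.empty

def fix_notice_deps (all_modules : List (String × List (String × List String))) (all_modules_attrs : List (String × List (String × List String))) : List (String × List (String × List String)) :=
  let lookup := pvLookup all_modules all_modules_attrs
  -- pass 3: rewrite NOTICE_DEPS of every module (in-place dict update, threaded as a Dict of Dicts)
  let D0 : PySem.Dict String (PySem.Dict String (List String)) :=
    PySem.Dict.mk (all_modules_attrs.map (fun p => (p.1, PySem.Dict.mk p.2)))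
  let DF := all_modules_attrs.foldl (fun D p =>
    let deps := (PySem.Dict.mk p.2).getD "NOTICE_DEPS" []
    let updated : PySem.Set String := deps.foldl (fun u dep =>
      let ns := pvNameSuffix dep
      (lookup.getD ns.1 [ns.1]).foldl (fun u name =>
        PySem.Set.add u (if ns.2 ≠ "" then pvCat [name, ":", ns.2] else name)) u) PySem.Set.empty
    D.insert p.1 ((D.getD p.1 PySem.Dict.empty).insert "NOTICE_DEPS"
      (PySem.List.sorted updated (fun x => x) false))) D0
  DF.items.map (fun p => (p.1, p.2.items))

-- ===== PORT B =====

-- B's nested helper adorned(dep_name)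
def pvAdorned (all_modules : List (String × List (String × List String)))
    (all_modules_attrs : List (String × List (String × List String))) (dep_name : String) : List String :=
  if (PySem.Dict.mk all_modules_attrs).contains dep_name
      && (PySem.Dict.mk ((PySem.Dict.mk all_modules_attrs).getD dep_name [])).contains "PATH" then
    [dep_name]
  else
    ([pvCat [dep_name, "_32"], pvCat [dep_name, "_64"], pvCat ["host_cross_", dep_name],
        pvCat ["host_cross_", dep_name, "_32"], pvCat ["host_cross_", dep_name, "_64"]]).filter
      (fun m => (PySem.Dict.mk all_modules).contains m)

def fix_notice_deps_alt (all_modules : List (String × List (String × List String))) (all_modules_attrs : List (String × List (String × List String))) : List (String × List (String × List String)) :=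
  -- pass 1: new_deps, a list of (module_name, sorted adorned deps) pairs
  let newDeps : List (String × List String) :=
    all_modules_attrs.map (fun p =>
      (p.1,
        PySem.List.sorted
          (((PySem.Dict.mk p.2).getD "NOTICE_DEPS" []).foldl (fun u dep =>
            let ns := pvNameSuffix dep
            (pvAdorned all_modules all_modules_attrs ns.1).foldl (fun u name =>
              PySem.Set.add u (if ns.2 ≠ "" then pvCat [name, ":", ns.2] else name)) u)
            PySem.Set.empty)
          (fun x => x) false))
  -- pass 2: assign them in place
  let D0 : PySem.Dict String (PySem.Dict String (List String)) :=
    PySem.Dict.mk (all_modules_attrs.map (fun p => (p.1, PySem.Dict.mk p.2)))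
  let DF := newDeps.foldl (fun D q =>
    D.insert q.1 ((D.getD q.1 PySem.Dict.empty).insert "NOTICE_DEPS" q.2)) D0
  DF.items.map (fun p => (p.1, p.2.items))

-- ===== PRECONDITION & SPEC =====
def Spec_fix_notice_deps (all_modules : List (String × List (String × List String))) (all_modules_attrs : List (String × List (String × List String))) (out : List (String × List (String × List String))) : Prop := out = fix_notice_deps_alt all_modules all_modules_attrs
instance (all_modules : List (String × List (String × List String))) (all_modules_attrs : List (String × List (String × List String))) (out : List (String × List (String × List String))) : Decidable (Spec_fix_notice_deps all_modules all_modules_attrs out) := by unfold Spec_fix_notice_deps; infer_instance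

-- ===== CLAIM (what is proved, stated in full; the proofs are below) =====
def Claim_equal_fix_notice_deps : Prop := ∀ (all_modules : List (String × List (String × List String))) (all_modules_attrs : List (String × List (String × List String))), Dom_fix_notice_deps all_modules all_modules_attrs → Spec_fix_notice_deps all_modules all_modules_attrs (fix_notice_deps all_modules all_modules_attrs)

-- ===== LEMMAS AND PROOFS =====
theorem pv_splitOn_go_acc (sep : List Char) (fuel : Nat) :
    ∀ (l cur : List Char) (acc : List (List Char)),
      PySem.Chars.splitOn.go sep fuel l cur acc = acc.reverse ++ PySem.Chars.splitOn.go sep fuel l cur [] := by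
  induction fuel with
  | zero => intro l cur acc; simp [PySem.Chars.splitOn.go]
  | succ fuel ih =>
    intro l cur acc
    cases l with
    | nil => simp [PySem.Chars.splitOn.go]
    | cons c rest =>
      rw [PySem.Chars.splitOn.go, PySem.Chars.splitOn.go]
      by_cases h : sep.isPrefixOf (c :: rest) = true
      · simp only [h, if_pos]
        rw [ih _ _ (cur.reverse :: acc), ih _ _ [cur.reverse]]
        simp
      · simp only [h, if_neg, Bool.false_eq_true, not_false_iff, if_neg]
        rw [ih rest (c :: cur) acc]

theorem pv_splitOnMax_go_acc (sep : List Char) (fuel : Nat) :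
    ∀ (m : Nat) (l cur : List Char) (acc : List (List Char)),
      PySem.Chars.splitOnMax.go sep fuel m l cur acc = acc.reverse ++ PySem.Chars.splitOnMax.go sep fuel m l cur [] := by
  induction fuel with
  | zero => intro m l cur acc; simp [PySem.Chars.splitOnMax.go]
  | succ fuel ih =>
    intro m l cur acc
    cases l with
    | nil => simp [PySem.Chars.splitOnMax.go]
    | cons c rest =>
      rw [PySem.Chars.splitOnMax.go, PySem.Chars.splitOnMax.go]
      by_cases hm : m = 0
      · simp [hm]
      · simp only [hm, if_neg, not_false_iff]
        by_cases h : sep.isPrefixOf (c :: rest) = true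
        · simp only [h, if_pos]
          rw [ih _ _ _ (cur.reverse :: acc), ih _ _ _ [cur.reverse]]
          simp
        · simp only [h, Bool.false_eq_true, not_false_iff, if_neg]
          rw [ih m rest (c :: cur) acc]

theorem pv_splitOn_go_head (fuel : Nat) :
    ∀ (l cur : List Char), l.length ≤ fuel →
      (PySem.Chars.splitOn.go [':'] fuel l cur []).headD [] = cur.reverse ++ l.takeWhile (fun c => !(c == ':')) := by
  induction fuel with
  | zero =>
    intro l cur hl
    have : l = [] := List.eq_nil_of_length_eq_zero (Nat.le_zero.mp hl)
    subst this; simp [PySem.Chars.splitOn.go]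
  | succ fuel ih =>
    intro l cur hl
    cases l with
    | nil => simp [PySem.Chars.splitOn.go]
    | cons c rest =>
      rw [PySem.Chars.splitOn.go]
      by_cases h : c = ':'
      · have hp : [':'].isPrefixOf (c :: rest) = true := by simp [List.isPrefixOf, h]
        simp only [hp, if_pos]
        rw [pv_splitOn_go_acc]
        simp [List.takeWhile, h]
      · have hp : ¬ ([':'].isPrefixOf (c :: rest) = true) := by simp [List.isPrefixOf]; exact fun hh => h hh.symm
        simp only [hp, Bool.false_eq_true, if_false]
        rw [ih rest (c :: cur) (by simpa using Nat.le_of_succ_le_succ hl)]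
        have hb : (!(c == ':')) = true := by simp [h]
        simp [List.takeWhile, hb]

theorem pv_splitOnMax_go_head (fuel : Nat) :
    ∀ (l cur : List Char), l.length ≤ fuel →
      (PySem.Chars.splitOnMax.go [':'] fuel 1 l cur []).headD [] = cur.reverse ++ l.takeWhile (fun c => !(c == ':')) := by
  induction fuel with
  | zero =>
    intro l cur hl
    have : l = [] := List.eq_nil_of_length_eq_zero (Nat.le_zero.mp hl)
    subst this; simp [PySem.Chars.splitOnMax.go]
  | succ fuel ih =>
    intro l cur hl
    cases l with
    | nil => simp [PySem.Chars.splitOnMax.go]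
    | cons c rest =>
      rw [PySem.Chars.splitOnMax.go]
      simp only [Nat.one_ne_zero, if_neg, not_false_iff]
      by_cases h : c = ':'
      · have hp : [':'].isPrefixOf (c :: rest) = true := by simp [List.isPrefixOf, h]
        simp only [hp, if_pos]
        rw [pv_splitOnMax_go_acc]
        simp [List.takeWhile, h]
      · have hp : ¬ ([':'].isPrefixOf (c :: rest) = true) := by simp [List.isPrefixOf]; exact fun hh => h hh.symm
        simp only [hp, Bool.false_eq_true, if_false]
        rw [ih rest (c :: cur) (by simpa using Nat.le_of_succ_le_succ hl)]
        have hb : (!(c == ':')) = true := by simp [h]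
        simp [List.takeWhile, hb]

theorem pv_headD_map (ps : List String) : (ps.map String.toList).headD [] = (ps.headD "").toList := by
  cases ps <;> simp

theorem pv_splitOn_headD (cs : List Char) :
    (PySem.Chars.splitOn cs [':']).headD [] = cs.takeWhile (fun c => !(c == ':')) := by
  unfold PySem.Chars.splitOn
  simpa using pv_splitOn_go_head (cs.length + 1) cs [] (by omega)

theorem pv_splitOnMax_headD (cs : List Char) :
    (PySem.Chars.splitOnMax cs [':'] 1).headD [] = cs.takeWhile (fun c => !(c == ':')) := by
  unfold PySem.Chars.splitOnMax
  rw [if_neg (by norm_num)]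
  simpa using pv_splitOnMax_go_head (cs.length + 1) cs [] (by omega)

theorem pv_split_getD (dep : String) :
    ((PySem.Str.split? dep ":").getD []).map String.toList = PySem.Chars.splitOn dep.toList [':'] := by
  have h := PySem.Str.split?_map dep ":"
  cases hs : PySem.Str.split? dep ":" with
  | none => rw [hs] at h; simp [PySem.Chars.split?] at h
  | some ps =>
    rw [hs] at h
    simp [PySem.Chars.split?] at h
    simpa using h

theorem pv_splitMax_getD (dep : String) :
    ((PySem.Str.splitMax? dep ":" 1).getD []).map String.toList = PySem.Chars.splitOnMax dep.toList [':'] 1 := by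
  have h := PySem.Str.splitMax?_map dep ":" 1
  cases hs : PySem.Str.splitMax? dep ":" 1 with
  | none => rw [hs] at h; simp [PySem.Chars.splitMax?] at h
  | some ps =>
    rw [hs] at h
    simp [PySem.Chars.splitMax?] at h
    simpa using h

theorem pv_splitHead_eq_nameSuffix (dep : String) : pvSplitHead dep = (pvNameSuffix dep).1 := by
  rw [← String.toList_inj]
  unfold pvSplitHead pvNameSuffix
  have hA : (((PySem.Str.split? dep ":").getD []).headD "").toList
      = dep.toList.takeWhile (fun c => !(c == ':')) := by
    rw [← pv_headD_map, pv_split_getD, pv_splitOn_headD]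
  by_cases h : PySem.Str.isIn ":" dep = true
  · simp only [h, if_pos]
    rw [hA, ← pv_headD_map, pv_splitMax_getD, pv_splitOnMax_headD]
  · simp only [h, Bool.false_eq_true, if_neg, not_false_iff]
    rw [hA]
    rw [List.takeWhile_eq_self_iff]
    intro x hx
    by_contra hc
    have hc' : x = ':' := by simpa using hc
    subst hc'
    have : PySem.Chars.isIn (String.toList ":") dep.toList = true := by
      rw [PySem.Chars.isIn_iff_infix]
      rcases List.append_of_mem hx with ⟨u, v, huv⟩
      exact ⟨u, v, by simp [huv]⟩
    exact h this

theorem pv_getD_foldl_insert (f : String → List String) (L : List String) :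
    ∀ (d : PySem.Dict String (List String)) (x : String) (dflt : List String),
      (L.foldl (fun d r => d.insert r (f r)) d).getD x dflt = if x ∈ L then f x else d.getD x dflt := by
  induction L with
  | nil => intro d x dflt; simp
  | cons r L ih =>
    intro d x dflt
    rw [List.foldl_cons, ih]
    by_cases hL : x ∈ L
    · simp [hL]
    · by_cases hr : x = r
      · subst hr; simp [hL, PySem.Dict.getD_insert_self]
      · simp [hL, hr, PySem.Dict.getD_insert]

theorem pv_lookup_eq_adorned (am ama : List (String × List (String × List String)))
    (x : String) (dflt : List String) (hx : x ∈ pvRefs ama) :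
    (pvLookup am ama).getD x dflt = pvAdorned am ama x := by
  unfold pvLookup
  rw [PySem.List.foldl_congr_mem _ _
    (fun d ref => d.insert ref (pvAdorned am ama ref)) _
    (by intro acc r _; simp only [pvAdorned]; split <;> rfl)]
  rw [pv_getD_foldl_insert]
  rw [if_pos ((PySem.List.mem_sorted _ _ _ _).mpr hx)]

theorem pv_refs_mono (l : List (String × List (String × List String))) :
    ∀ (s : PySem.Set String) (x : String), x ∈ s →
      x ∈ l.foldl (fun s p =>
        if (PySem.Dict.mk p.2).contains "NOTICE_DEPS" then
          ((PySem.Dict.mk p.2).getD "NOTICE_DEPS" []).foldl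
            (fun s dep => PySem.Set.add s (pvSplitHead dep)) s
        else s) s := by
  induction l with
  | nil => intro s x hx; simpa using hx
  | cons p l ih =>
    intro s x hx
    rw [List.foldl_cons]
    apply ih
    split
    · exact (PySem.Set.mem_foldl_add _ _ _ _).mpr (Or.inl hx)
    · exact hx

theorem pv_mem_refs_aux (l : List (String × List (String × List String)))
    (p : String × List (String × List String)) (hp : p ∈ l)
    (dep : String) (hdep : dep ∈ (PySem.Dict.mk p.2).getD "NOTICE_DEPS" []) :
    ∀ (s : PySem.Set String),
      pvSplitHead dep ∈ l.foldl (fun s q =>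
        if (PySem.Dict.mk q.2).contains "NOTICE_DEPS" then
          ((PySem.Dict.mk q.2).getD "NOTICE_DEPS" []).foldl
            (fun s dep => PySem.Set.add s (pvSplitHead dep)) s
        else s) s := by
  induction l with
  | nil => cases hp
  | cons q l ih =>
    intro s
    rw [List.foldl_cons]
    rcases List.mem_cons.mp hp with h | h
    · subst h
      apply pv_refs_mono
      by_cases hc : (PySem.Dict.mk p.2).contains "NOTICE_DEPS" = true
      · rw [if_pos hc]
        exact (PySem.Set.mem_foldl_add _ _ _ _).mpr (Or.inr ⟨dep, hdep, rfl⟩)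
      · exfalso
        have hcf : (PySem.Dict.mk p.2).contains "NOTICE_DEPS" = false :=
          Bool.eq_false_iff.mpr hc
        rw [PySem.Dict.getD_of_not_contains _ _ hcf] at hdep
        cases hdep
    · exact ih h _

theorem pv_mem_refs (ama : List (String × List (String × List String)))
    (p : String × List (String × List String)) (hp : p ∈ ama)
    (dep : String) (hdep : dep ∈ (PySem.Dict.mk p.2).getD "NOTICE_DEPS" []) :
    pvSplitHead dep ∈ pvRefs ama := pv_mem_refs_aux ama p hp dep hdep PySem.Set.empty

theorem fix_notice_deps_spec : Claim_equal_fix_notice_deps := by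
  intro am ama _hdom
  unfold Spec_fix_notice_deps
  simp only [fix_notice_deps, fix_notice_deps_alt]
  rw [List.foldl_map]
  congr 1
  congr 1
  apply PySem.List.foldl_congr_mem
  intro D p hp
  beta_reduce
  congr 3
  apply PySem.List.foldl_congr_mem
  intro u dep hdep
  have h1 : (pvNameSuffix dep).1 ∈ pvRefs ama := by
    rw [← pv_splitHead_eq_nameSuffix]
    exact pv_mem_refs ama p hp dep hdep
  rw [pv_lookup_eq_adorned am ama _ _ h1]
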